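-- pv_equiv track=rewrite | github.com/maddmhep/maddm | maddm_run_interface.py | _match_nested_parentheses
-- ===== SOURCE A (Python) =====
-- def _match_nested_parentheses(text):
--     ''' To be substituted with a recursive regex from Python 3 on '''
--     stack = []
--     matches = []
--     for i, char in enumerate(text):
--         if char == '(':
--             stack.append(i)
--         elif char == ')':
--             if stack:
--                 start = stack.pop()
--                 matches.append(text[start:i+1])
--     return matches
-- ===== SOURCE B (Python) =====
-- def _match_nested_parentheses(text):
--     ''' Recursive-descent version: parse a parenthesized region recursively,
--     emitting matches as their closing parenthesis is reached. '''
--     matches = []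
--
--     def parse_inner(start, i):
--         # region opened by '(' at position start; returns (next_i, closed)
--         while i < len(text):
--             c = text[i]
--             if c == '(':
--                 i, closed = parse_inner(i, i + 1)
--                 if not closed:
--                     return i, False
--             elif c == ')':
--                 matches.append(text[start:i + 1])
--                 return i + 1, True
--             else:
--                 i += 1
--         return i, False
--
--     i = 0
--     while i < len(text):
--         if text[i] == '(':
--             i, closed = parse_inner(i, i + 1)
--             if not closed:
--                 break
--         else:
--             i += 1
--     return matches
-- ===== Notes on version B (the rewrite author's own statement) =====
-- stated objective: alternative
-- what changed: Replaced the index-stack scan with a recursive-descent parser whose helper parses one parenthesized region and returns the position after its matching ')', emitting each match as it closes.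
import Mathlib
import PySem

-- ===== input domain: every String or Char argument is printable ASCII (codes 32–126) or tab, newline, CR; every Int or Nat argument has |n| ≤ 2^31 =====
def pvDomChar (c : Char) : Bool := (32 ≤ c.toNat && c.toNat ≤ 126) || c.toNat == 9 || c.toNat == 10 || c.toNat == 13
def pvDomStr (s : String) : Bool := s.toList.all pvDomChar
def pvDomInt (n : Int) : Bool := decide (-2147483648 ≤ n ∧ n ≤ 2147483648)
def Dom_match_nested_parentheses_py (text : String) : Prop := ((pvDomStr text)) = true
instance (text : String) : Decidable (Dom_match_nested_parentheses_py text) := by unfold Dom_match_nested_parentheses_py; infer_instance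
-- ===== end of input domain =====

-- B replaces A's index-stack scan with a recursive-descent parser (one helper per parenthesized region); alternative decomposition, same cost.


-- ===== PORT A =====
-- one step of A's for-loop body: state = (stack, matches), input = (i, char)
def mnpStep (text : String) (st : List Int × List String) (p : Int × Char) : List Int × List String :=
  if p.2 = '(' then (st.1 ++ [p.1], st.2)
  else if p.2 = ')' then
    if st.1 ≠ [] then
      match PySem.List.pop? st.1 (-1) with
      | some (start, stack') => (stack', st.2 ++ [PySem.Str.slice text (some start) (some (p.1 + 1))])
      | none => st
    else st
  else st

def match_nested_parentheses_py (text : String) : List String :=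
  ((PySem.List.enumerate text.toList 0).foldl (mnpStep text) ([], [])).2

-- ===== PORT B =====
-- parse_inner: region opened by '(' at `start`; scan from position i (chars = text[i:]);
-- returns (matches, next position, remaining chars, closed?). Fuel makes the while-loop total.
def mnpParseIn (full : String) : Nat → Int → Int → List Char → List String → List String × Int × List Char × Bool
  | 0, _, i, rest, m => (m, i, rest, false)
  | f+1, start, i, rest, m =>
    match rest with
    | [] => (m, i, [], false)
    | c :: rs =>
      if c = '(' then
        match mnpParseIn full f i (i+1) rs m with
        | (m', i', rs', true) => mnpParseIn full f start i' rs' m'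
        | r => r
      else if c = ')' then (m ++ [PySem.Str.slice full (some start) (some (i+1))], i+1, rs, true)
      else mnpParseIn full f start (i+1) rs m

-- top-level scan: skip everything but '(', which opens a region parsed by mnpParseIn
def mnpParseTop (full : String) : Nat → Int → List Char → List String → List String
  | 0, _, _, m => m
  | f+1, i, rest, m =>
    match rest with
    | [] => m
    | c :: rs =>
      if c = '(' then
        match mnpParseIn full f i (i+1) rs m with
        | (m', i', rs', true) => mnpParseTop full f i' rs' m'
        | (m', _, _, false) => m'
      else mnpParseTop full f (i+1) rs m

def match_nested_parentheses_py_alt (text : String) : List String :=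
  mnpParseTop text (text.toList.length + 1) 0 text.toList []

-- ===== PRECONDITION & SPEC =====
def Spec_match_nested_parentheses_py (text : String) (out : List String) : Prop := out = match_nested_parentheses_py_alt text
instance (text : String) (out : List String) : Decidable (Spec_match_nested_parentheses_py text out) := by unfold Spec_match_nested_parentheses_py; infer_instance

-- ===== CLAIM (what is proved, stated in full; the proofs are below) =====
def Claim_equal_match_nested_parentheses_py : Prop := ∀ (text : String), Dom_match_nested_parentheses_py text → Spec_match_nested_parentheses_py text (match_nested_parentheses_py text)

-- ===== LEMMAS AND PROOFS =====

-- A's loop, written recursively with the stack's top at the head (proof helper)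
def mnpLoopA (full : String) : Int → List Char → List Int → List String → List String
  | _, [], _, m => m
  | i, c :: rs, stack, m =>
    if c = '(' then mnpLoopA full (i+1) rs (i :: stack) m
    else if c = ')' then
      match stack with
      | [] => mnpLoopA full (i+1) rs [] m
      | j :: s' => mnpLoopA full (i+1) rs s' (m ++ [PySem.Str.slice full (some j) (some (i+1))])
    else mnpLoopA full (i+1) rs stack m

theorem mnp_foldA (full : String) :
    ∀ (rest : List Char) (i : Int) (u : List Int) (m : List String),
      ((PySem.List.enumerate rest i).foldl (mnpStep full) (u.reverse, m)).2
        = mnpLoopA full i rest u m := by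
  intro rest
  induction rest with
  | nil => intro i u m; simp [PySem.List.enumerate_nil, mnpLoopA]
  | cons c rs ih =>
    intro i u m
    rw [PySem.List.enumerate_cons, List.foldl_cons]
    by_cases hc : c = '('
    · subst hc
      have hstep : mnpStep full (u.reverse, m) ((i, '(')) = ((i :: u).reverse, m) := by
        simp [mnpStep]
      rw [hstep, ih]
      simp [mnpLoopA]
    · by_cases hc2 : c = ')'
      · subst hc2
        cases u with
        | nil =>
          have hstep : mnpStep full (([] : List Int).reverse, m) ((i, ')')) = (([] : List Int).reverse, m) := by
            simp [mnpStep]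
          rw [hstep, ih]
          simp [mnpLoopA]
        | cons j t =>
          have hstep : mnpStep full ((j :: t).reverse, m) ((i, ')'))
              = (t.reverse, m ++ [PySem.Str.slice full (some j) (some (i+1))]) := by
            simp [mnpStep, List.reverse_cons, PySem.List.pop?_last]
          rw [hstep, ih]
          simp [mnpLoopA]
      · have hstep : mnpStep full (u.reverse, m) ((i, c)) = (u.reverse, m) := by
          simp [mnpStep, hc, hc2]
        rw [hstep, ih]
        simp [mnpLoopA, hc, hc2]

theorem mnp_shrink (full : String) :
    ∀ (f : Nat) (start i : Int) (rest : List Char) (m : List String),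
      (mnpParseIn full f start i rest m).2.2.1.length ≤ rest.length := by
  intro f
  induction f with
  | zero => intro start i rest m; simp [mnpParseIn]
  | succ f ih =>
    intro start i rest m
    cases rest with
    | nil => simp [mnpParseIn]
    | cons c rs =>
      by_cases hc : c = '('
      · subst hc
        have hR : mnpParseIn full (f+1) start i ('(' :: rs) m
            = (match mnpParseIn full f i (i+1) rs m with
               | (m', i', rs', true) => mnpParseIn full f start i' rs' m'
               | r => r) := by
          simp [mnpParseIn]
        rw [hR]
        rcases hin : mnpParseIn full f i (i+1) rs m with ⟨m', i', rs', b⟩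
        have h1 : rs'.length ≤ rs.length := by
          have := ih i (i+1) rs m; rw [hin] at this; exact this
        cases b with
        | true =>
          have h2 := ih start i' rs' m'
          simp only [List.length_cons]
          omega
        | false => simp only [List.length_cons]; omega
      · by_cases hc2 : c = ')'
        · subst hc2; simp [mnpParseIn]
        · have hR : mnpParseIn full (f+1) start i (c :: rs) m
              = mnpParseIn full f start (i+1) rs m := by
            simp [mnpParseIn, hc, hc2]
          rw [hR]
          have := ih start (i+1) rs m
          simp only [List.length_cons]
          omega

theorem mnp_L1 (full : String) :
    ∀ (f : Nat) (rest : List Char), rest.length ≤ f →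
      ∀ (i start : Int) (s : List Int) (m : List String),
        mnpLoopA full i rest (start :: s) m
          = (match mnpParseIn full f start i rest m with
             | (m', i', rs', true) => mnpLoopA full i' rs' s m'
             | (m', _, _, false) => m') := by
  intro f
  induction f with
  | zero =>
    intro rest h i start s m
    have : rest = [] := List.eq_nil_of_length_eq_zero (Nat.le_zero.mp h)
    subst this; simp [mnpLoopA, mnpParseIn]
  | succ f ih =>
    intro rest h i start s m
    cases rest with
    | nil => simp [mnpLoopA, mnpParseIn]
    | cons c rs =>
      have hrs : rs.length ≤ f := by simp only [List.length_cons] at h; omega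
      by_cases hc : c = '('
      · subst hc
        have hL : mnpLoopA full i ('(' :: rs) (start :: s) m
            = mnpLoopA full (i+1) rs (i :: (start :: s)) m := by
          simp [mnpLoopA]
        have hR : mnpParseIn full (f+1) start i ('(' :: rs) m
            = (match mnpParseIn full f i (i+1) rs m with
               | (m', i', rs', true) => mnpParseIn full f start i' rs' m'
               | r => r) := by
          simp [mnpParseIn]
        rw [hL, ih rs hrs (i+1) i (start :: s) m, hR]
        rcases hin : mnpParseIn full f i (i+1) rs m with ⟨m', i', rs', b⟩
        cases b with
        | true =>
          have hlen : rs'.length ≤ f := by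
            have := mnp_shrink full f i (i+1) rs m
            rw [hin] at this
            simp only at this
            omega
          simp only
          exact ih rs' hlen i' start s m'
        | false => simp only
      · by_cases hc2 : c = ')'
        · subst hc2
          simp [mnpLoopA, mnpParseIn]
        · have hL : mnpLoopA full i (c :: rs) (start :: s) m
              = mnpLoopA full (i+1) rs (start :: s) m := by
            simp [mnpLoopA, hc, hc2]
          have hR : mnpParseIn full (f+1) start i (c :: rs) m
              = mnpParseIn full f start (i+1) rs m := by
            simp [mnpParseIn, hc, hc2]
          rw [hL, hR]
          exact ih rs hrs (i+1) start s m

theorem mnp_L2 (full : String) :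
    ∀ (f : Nat) (rest : List Char), rest.length ≤ f →
      ∀ (i : Int) (m : List String),
        mnpLoopA full i rest [] m = mnpParseTop full f i rest m := by
  intro f
  induction f with
  | zero =>
    intro rest h i m
    have : rest = [] := List.eq_nil_of_length_eq_zero (Nat.le_zero.mp h)
    subst this; simp [mnpLoopA, mnpParseTop]
  | succ f ih =>
    intro rest h i m
    cases rest with
    | nil => simp [mnpLoopA, mnpParseTop]
    | cons c rs =>
      have hrs : rs.length ≤ f := by simp only [List.length_cons] at h; omega
      by_cases hc : c = '('
      · subst hc
        have hL : mnpLoopA full i ('(' :: rs) [] m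
            = mnpLoopA full (i+1) rs [i] m := by
          simp [mnpLoopA]
        have hR : mnpParseTop full (f+1) i ('(' :: rs) m
            = (match mnpParseIn full f i (i+1) rs m with
               | (m', i', rs', true) => mnpParseTop full f i' rs' m'
               | (m', _, _, false) => m') := by
          simp [mnpParseTop]
        rw [hL, mnp_L1 full f rs hrs (i+1) i [] m, hR]
        rcases hin : mnpParseIn full f i (i+1) rs m with ⟨m', i', rs', b⟩
        cases b with
        | true =>
          have hlen : rs'.length ≤ f := by
            have := mnp_shrink full f i (i+1) rs m
            rw [hin] at this
            simp only at this
            omega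
          simp only
          exact ih rs' hlen i' m'
        | false => simp only
      · have hL : mnpLoopA full i (c :: rs) [] m = mnpLoopA full (i+1) rs [] m := by
          by_cases hc2 : c = ')'
          · subst hc2; simp [mnpLoopA]
          · simp [mnpLoopA, hc, hc2]
        have hR : mnpParseTop full (f+1) i (c :: rs) m = mnpParseTop full f (i+1) rs m := by
          simp [mnpParseTop, hc]
        rw [hL, hR]
        exact ih rs hrs (i+1) m

-- ===== VERDICT (by name: the statement is the Claim_ definition above) =====
theorem match_nested_parentheses_py_spec : Claim_equal_match_nested_parentheses_py := by
  intro text _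
  unfold Spec_match_nested_parentheses_py match_nested_parentheses_py match_nested_parentheses_py_alt
  have h1 := mnp_foldA text text.toList 0 [] []
  simp only [List.reverse_nil] at h1
  rw [h1]
  exact mnp_L2 text (text.toList.length + 1) text.toList (by omega) 0 []
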